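-- pv_equiv track=rewrite | github.com/mdbruffey/adventofcode | 2016/Day-09/solve.py | get_decompressed_length
-- ===== SOURCE A (Python) =====
-- def get_decompressed_length(data):
--     decompressed = 0
--     i = 0
--     while i < len(data):
--         if data[i] == "(":
--             marker = ""
--             i += 1
--             while data[i] != ")":
--                 marker += data[i]
--                 i += 1
--             seg_length, repeat = list(map(int, marker.split("x")))
--             segment = data[i+1:i+1+seg_length]
--             if "(" not in segment:
--                 decompressed += len(segment)*repeat
--                 data = data[i+1+seg_length:]
--                 i = 0
--             else:
--                 decompressed += get_decompressed_length(segment*repeat)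
--                 data = data[i+1+seg_length:]
--                 i = 0
--         else:
--             decompressed += 1
--             i += 1
--
--     return decompressed
-- ===== SOURCE B (Python) =====
-- def get_decompressed_length(data):
--     total = 0
--     i = 0
--     n = len(data)
--     while i < n:
--         if data[i] == "(":
--             j = data.index(")", i)
--             length, repeat = map(int, data[i+1:j].split("x"))
--             total += repeat * get_decompressed_length(data[j+1:j+1+length])
--             i = j + 1 + length
--         else:
--             total += 1
--             i += 1
--     return total
-- ===== Notes on version B (the rewrite author's own statement) =====
-- stated objective: alternative
-- what changed: B makes a single left-to-right pass that recurses once on each marker's segment and multiplies the result by the repeat count, instead of A's materialising segment*repeat as a new string and rescanning it.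
-- outside the precondition, e.g. on get_decompressed_length('(9x0)('): A returns 0, B raises ValueError; on get_decompressed_length('(2x-2)(('): A returns 0, B raises ValueError
import Mathlib
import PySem

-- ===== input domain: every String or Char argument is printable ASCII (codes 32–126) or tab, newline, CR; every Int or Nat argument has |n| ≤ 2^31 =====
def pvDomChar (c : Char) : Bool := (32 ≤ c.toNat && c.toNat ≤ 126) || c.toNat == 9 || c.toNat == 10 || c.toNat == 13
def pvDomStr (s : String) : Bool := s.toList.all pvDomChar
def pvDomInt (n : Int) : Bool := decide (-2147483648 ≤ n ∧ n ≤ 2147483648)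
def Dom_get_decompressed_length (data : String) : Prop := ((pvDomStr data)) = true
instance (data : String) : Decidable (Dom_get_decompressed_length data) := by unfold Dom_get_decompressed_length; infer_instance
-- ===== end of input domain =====

-- B recurses on each marker's segment once and multiplies by the repeat count, instead of
-- A's materialising segment*repeat as a string and rescanning it (return values proved equal).

-- shared helper: `seg_length, repeat = list(map(int, marker.split("x")))` — the identical
-- expression occurs in both Pythons; none = Python's ValueError (wrong count or bad int).
def pvParseInts (marker : List Char) : Option (Int × Int) :=
  match PySem.Chars.split? marker ['x'] with
  | none => none
  | some parts =>
    match parts.mapM PySem.Int.ofChars? with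
    | none => none
    | some [a, b] => some (a, b)
    | some _ => none

-- ===== PORT A =====
-- inner `while data[i] != ")": marker += data[i]; i += 1` — none = IndexError (no ')').
def pvScanA (s : List Char) (i : Nat) (marker : List Char) : Option (List Char × Nat) :=
  if h : i < s.length then
    if s[i] = ')' then some (marker, i)
    else pvScanA s (i + 1) (marker ++ [s[i]])
  else none
termination_by s.length - i

-- termination helper for the ports (cited in decreasing_by only)
theorem pv_len_slice_from_lt (s : List Char) (a : Int) (h1 : 1 ≤ a) (h2 : 0 < s.length) :
    (PySem.List.slice s (some a) none).length < s.length := by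
  rw [PySem.List.slice_from s (by omega : (0:Int) ≤ a)]
  simp only [List.length_drop]
  omega

theorem pv_len_slice_lt (s : List Char) (a b : Int) (h1 : 1 ≤ a) (h2 : 0 < s.length) :
    (PySem.List.slice s (some a) (some b)).length < s.length := by
  rw [PySem.List.length_slice]
  have hb := PySem.List.clampIdx_le s.length b
  have ha : PySem.List.clampIdx s.length a = min a.toNat s.length := by
    unfold PySem.List.clampIdx; rw [if_neg (by omega)]
  omega

-- A's main loop; `fuel` only bounds the depth of A's recursive self-call on segment*repeat
-- (a totality device: it never runs out on inputs admitted by Pre_, see pvAuxA_eq_gBsem).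
-- The `hL : L < 0 → junk` branch is likewise a totality guard unreachable under Pre_.
def pvAuxA (fuel : Nat) (s : List Char) (i : Nat) (dec : Int) : Int :=
  if h : i < s.length then
    if s[i] = '(' then
      match pvScanA s (i + 1) [] with
      | none => dec                      -- Python: IndexError (excluded by Pre_)
      | some (marker, j) =>
        match pvParseInts marker with
        | none => dec                    -- Python: ValueError (excluded by Pre_)
        | some (L, R) =>
          if hL : L < 0 then dec         -- totality guard (excluded by Pre_)
          else
            if !PySem.Chars.isIn ['('] (PySem.List.slice s (some ((j : Int) + 1)) (some ((j : Int) + 1 + L))) then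
              pvAuxA fuel (PySem.List.slice s (some ((j : Int) + 1 + L)) none) 0
                (dec + ((PySem.List.slice s (some ((j : Int) + 1)) (some ((j : Int) + 1 + L))).length : Int) * R)
            else
              match fuel with
              | 0 => dec                 -- fuel never reaches 0 under Pre_
              | fuel' + 1 =>
                pvAuxA (fuel' + 1) (PySem.List.slice s (some ((j : Int) + 1 + L)) none) 0
                  (dec + pvAuxA fuel' (PySem.List.pyRepeat (PySem.List.slice s (some ((j : Int) + 1)) (some ((j : Int) + 1 + L))) R) 0 0)
    else
      pvAuxA fuel s (i + 1) (dec + 1)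
  else dec
termination_by (fuel, s.length, s.length - i)
decreasing_by
  · exact Prod.Lex.right _ (Prod.Lex.left _ _ (pv_len_slice_from_lt s _ (by omega) (by omega)))
  · exact Prod.Lex.left _ _ (by omega)
  · exact Prod.Lex.right _ (Prod.Lex.left _ _ (pv_len_slice_from_lt s _ (by omega) (by omega)))
  · exact Prod.Lex.right _ (Prod.Lex.right _ (by omega))

def get_decompressed_length (data : String) : Int :=
  pvAuxA (data.toList.length + 1) data.toList 0 0

-- ===== PORT B =====
-- single left-to-right pass; recurses once on each marker's segment and multiplies.
-- `data.index(")", i)` is ported as i + index?(drop i) — exact for a single-char needle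
-- and a nonnegative start (none = Python's ValueError).
def pvLoopB (s : List Char) (i : Nat) (total : Int) : Int :=
  if h : i < s.length then
    if s[i] = '(' then
      match hk : PySem.List.index? (s.drop i) ')' with
      | none => total                    -- Python: ValueError (excluded by Pre_)
      | some k =>
        match pvParseInts (PySem.List.slice s (some ((i : Int) + 1)) (some ((i + k : Nat) : Int))) with
        | none => total                  -- Python: ValueError (excluded by Pre_)
        | some (L, R) =>
          if hL : L < 0 then total       -- totality guard (excluded by Pre_)
          else
            pvLoopB s (i + k + 1 + L.toNat)
              (total + R * pvLoopB
                (PySem.List.slice s (some (((i + k : Nat) : Int) + 1)) (some (((i + k : Nat) : Int) + 1 + L))) 0 0)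
    else
      pvLoopB s (i + 1) (total + 1)
  else total
termination_by (s.length, s.length - i)
decreasing_by
  · exact Prod.Lex.left _ _ (pv_len_slice_lt s _ _ (by omega) (by omega))
  · exact Prod.Lex.right _ (by omega)
  · exact Prod.Lex.right _ (by omega)

def get_decompressed_length_alt (data : String) : Int :=
  pvLoopB data.toList 0 0

-- ===== PRECONDITION & SPEC =====
-- pvWFb checks the marker grammar (fuel-bounded, fuel > length suffices): every '(' opens
-- a marker "(<int>x<int>)" whose two ints parse (Python `int`), are nonnegative, and whose
-- declared segment lies entirely within the remaining data, recursively.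
def pvWFb : Nat → List Char → Bool
  | 0, _ => false
  | _ + 1, [] => true
  | f + 1, c :: cs =>
    if c = '(' then
      match PySem.List.index? cs ')' with
      | none => false
      | some k =>
        match pvParseInts (cs.take k) with
        | none => false
        | some (L, R) =>
          decide (0 ≤ L ∧ 0 ≤ R ∧ L.toNat + (k + 1) ≤ cs.length) &&
            pvWFb f ((cs.drop (k + 1)).take L.toNat) && pvWFb f ((cs.drop (k + 1)).drop L.toNat)
    else pvWFb f cs

-- Pre_ excludes malformed compressed inputs: missing ')', a marker whose numbers do not
-- parse as two nonnegative ints, or a declared segment length running past the end of the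
-- data (recursively) — there A's expand-and-rescan lets markers straddle copy/segment
-- boundaries (or raises), an accident of its strategy, and B's own parse raises ValueError
-- on most of them.
def Pre_get_decompressed_length (data : String) : Prop :=
  pvWFb (data.toList.length + 1) data.toList = true
instance (data : String) : Decidable (Pre_get_decompressed_length data) := by
  unfold Pre_get_decompressed_length; infer_instance

def pvWitness_get_decompressed_length : String := "x(7x2)(2x3)ab"

def Spec_get_decompressed_length (data : String) (out : Int) : Prop := out = get_decompressed_length_alt data
instance (data : String) (out : Int) : Decidable (Spec_get_decompressed_length data out) := by
  unfold Spec_get_decompressed_length; infer_instance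

-- ===== CLAIM (what is proved, stated in full; the proofs are below) =====
def Claim_equal_get_decompressed_length : Prop := ∀ (data : String), Dom_get_decompressed_length data → Pre_get_decompressed_length data → Spec_get_decompressed_length data (get_decompressed_length data)

-- ===== LEMMAS AND PROOFS =====

-- proof-side: pvDWF re-states pvWFb without fuel and records nesting depth: every '(' opens a marker
-- "(<int>x<int>)" whose two ints parse (Python `int`), are nonnegative, and whose declared
-- segment lies entirely within the remaining data, recursively.  none = malformed.
def pvDWF : List Char → Option Nat
  | [] => some 0
  | c :: cs =>
    if c = '(' then
      match PySem.List.index? cs ')' with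
      | none => none
      | some k =>
        match pvParseInts (cs.take k) with
        | none => none
        | some (L, R) =>
          if 0 ≤ L ∧ 0 ≤ R ∧ L.toNat + (k + 1) ≤ cs.length then
            match pvDWF ((cs.drop (k + 1)).take L.toNat), pvDWF ((cs.drop (k + 1)).drop L.toNat) with
            | some d1, some d2 => some (max (d1 + 1) d2)
            | _, _ => none
          else none
    else pvDWF cs
termination_by s => s.length
decreasing_by
  · simp only [List.length_take, List.length_drop, List.length_cons]; omega
  · simp only [List.length_drop, List.length_cons]; omega
  · simp only [List.length_cons]; omega


-- proof-side semantics of B, phrased on the suffix being consumed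
def pvG : List Char → Int
  | [] => 0
  | c :: cs =>
    if c = '(' then
      match PySem.List.index? cs ')' with
      | none => 0
      | some k =>
        match pvParseInts (cs.take k) with
        | none => 0
        | some (L, R) =>
          if L < 0 then 0
          else R * pvG ((cs.drop (k + 1)).take L.toNat) + pvG ((cs.drop (k + 1)).drop L.toNat)
    else 1 + pvG cs
termination_by s => s.length
decreasing_by
  · simp only [List.length_take, List.length_drop, List.length_cons]; omega
  · simp only [List.length_drop, List.length_cons]; omega
  · simp only [List.length_cons]; omega

theorem pvG_no_paren (s : List Char) (h : '(' ∉ s) : pvG s = s.length := by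
  induction s with
  | nil => simp [pvG]
  | cons c cs ih =>
    simp only [List.mem_cons, not_or] at h
    rw [pvG, if_neg (fun hc => h.1 hc.symm), ih h.2]
    simp
    omega

theorem pv_mem_of_index? {cs : List Char} {k : Nat} (h : PySem.List.index? cs ')' = some k) : ')' ∈ cs := by
  rw [← PySem.List.index?_isSome_iff (v := ')') (xs := cs), h]; rfl

theorem pv_append_aux : ∀ (n : Nat) (s t : List Char) (a b : Nat), s.length ≤ n →
    pvDWF s = some a → pvDWF t = some b →
    pvDWF (s ++ t) = some (max a b) ∧ pvG (s ++ t) = pvG s + pvG t := by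
  intro n
  induction n with
  | zero =>
    intro s t a b hn hs ht
    have : s = [] := List.eq_nil_of_length_eq_zero (by omega)
    subst this
    simp only [pvDWF, Option.some.injEq] at hs
    simp [pvG, ← hs, ht]
  | succ n ih =>
    intro s t a b hn hs ht
    match s with
    | [] =>
      simp only [pvDWF, Option.some.injEq] at hs
      simp [pvG, ← hs, ht]
    | c :: cs =>
      by_cases hc : c = '('
      · subst hc
        rw [pvDWF, if_pos rfl] at hs
        match hk : PySem.List.index? cs ')' with
        | none => rw [hk] at hs; dsimp only at hs; exact absurd hs (by simp)
        | some k =>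
          rw [hk] at hs; dsimp only at hs
          match hp : pvParseInts (cs.take k) with
          | none => rw [hp] at hs; dsimp only at hs; exact absurd hs (by simp)
          | some (L, R) =>
            rw [hp] at hs; dsimp only at hs
            by_cases hcond : 0 ≤ L ∧ 0 ≤ R ∧ L.toNat + (k + 1) ≤ cs.length
            case neg => rw [if_neg hcond] at hs; exact absurd hs (by simp)
            rw [if_pos hcond] at hs
            match h1 : pvDWF ((cs.drop (k + 1)).take L.toNat), h2 : pvDWF ((cs.drop (k + 1)).drop L.toNat) with
            | none, _ => rw [h1] at hs; dsimp only at hs; exact absurd hs (by simp)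
            | some d1, none => rw [h1, h2] at hs; dsimp only at hs; exact absurd hs (by simp)
            | some d1, some d2 =>
              rw [h1, h2] at hs; dsimp only at hs
              have ha : a = max (d1 + 1) d2 := by simpa using hs.symm
              -- facts
              have hkmem : ')' ∈ cs := pv_mem_of_index? hk
              obtain ⟨hklt, -, -⟩ := PySem.List.getElem_of_index?_eq_some hk
              -- IH on the tail after the segment, appended with t
              have hlen2 : ((cs.drop (k + 1)).drop L.toNat).length ≤ n := by
                simp only [List.length_drop]
                have : cs.length ≤ n := by simpa using Nat.le_of_succ_le_succ hn
                omega
              obtain ⟨ihD, ihG⟩ := ih ((cs.drop (k + 1)).drop L.toNat) t d2 b hlen2 h2 ht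
              -- rewrite the appended versions
              have e0 : ('(' :: cs) ++ t = '(' :: (cs ++ t) := rfl
              have e1 : PySem.List.index? (cs ++ t) ')' = some k := by
                rw [PySem.List.index?_append_of_mem t hkmem, hk]
              have e2 : (cs ++ t).take k = cs.take k := List.take_append_of_le_length (by omega)
              have e3 : (cs ++ t).drop (k + 1) = cs.drop (k + 1) ++ t :=
                List.drop_append_of_le_length (by omega)
              have e4 : (cs.drop (k + 1) ++ t).take L.toNat = (cs.drop (k + 1)).take L.toNat :=
                List.take_append_of_le_length (by simp only [List.length_drop]; omega)
              have e5 : (cs.drop (k + 1) ++ t).drop L.toNat = (cs.drop (k + 1)).drop L.toNat ++ t :=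
                List.drop_append_of_le_length (by simp only [List.length_drop]; omega)
              have hcond' : 0 ≤ L ∧ 0 ≤ R ∧ L.toNat + (k + 1) ≤ (cs ++ t).length := by
                simp only [List.length_append]; exact ⟨hcond.1, hcond.2.1, by omega⟩
              constructor
              · rw [e0, pvDWF, if_pos rfl, e1]; dsimp only; rw [e2, hp]; dsimp only; rw [if_pos hcond', e3, e4, e5, h1, ihD]; dsimp only
                simp [ha, Nat.max_assoc]
              · rw [e0, pvG, if_pos rfl, e1]; dsimp only; rw [e2, hp]; dsimp only; rw [if_neg (by omega : ¬ L < 0), e3, e4, e5, ihG]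
                rw [pvG, if_pos rfl, hk]; dsimp only; rw [hp]; dsimp only; rw [if_neg (by omega : ¬ L < 0)]
                ring
      · rw [pvDWF, if_neg hc] at hs
        obtain ⟨ihD, ihG⟩ := ih cs t a b (by simpa using Nat.le_of_succ_le_succ hn) hs ht
        constructor
        · rw [List.cons_append, pvDWF, if_neg hc]; exact ihD
        · rw [List.cons_append, pvG, if_neg hc, pvG, if_neg hc, ihG]; ring

theorem pv_repeat_aux (s : List Char) (a : Nat) (hs : pvDWF s = some a) : ∀ n : Nat,
    (∃ d ≤ a, pvDWF (List.replicate n s).flatten = some d) ∧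
      pvG (List.replicate n s).flatten = n * pvG s := by
  intro n
  induction n with
  | zero => exact ⟨⟨0, Nat.zero_le a, by simp [pvDWF]⟩, by simp [pvG]⟩
  | succ n ih =>
    obtain ⟨⟨d, hda, hd⟩, hg⟩ := ih
    rw [List.replicate_succ, List.flatten_cons]
    obtain ⟨hD, hG⟩ := pv_append_aux s.length s (List.replicate n s).flatten a d le_rfl hs hd
    refine ⟨⟨max a d, by omega, hD⟩, ?_⟩
    rw [hG, hg]; push_cast; ring

theorem pv_repeat (s : List Char) (a : Nat) (R : Int) (hs : pvDWF s = some a) :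
    (∃ d ≤ a, pvDWF (PySem.List.pyRepeat s R) = some d) ∧
      (0 ≤ R → pvG (PySem.List.pyRepeat s R) = R * pvG s) := by
  obtain ⟨h1, h2⟩ := pv_repeat_aux s a hs R.toNat
  refine ⟨h1, fun hR => ?_⟩
  show pvG (List.replicate R.toNat s).flatten = R * pvG s
  rw [h2]
  congr 1
  omega

theorem pvDWF_le_length_aux : ∀ (n : Nat) (s : List Char) (d : Nat), s.length ≤ n →
    pvDWF s = some d → d ≤ s.length := by
  intro n
  induction n with
  | zero =>
    intro s d hn hs
    have : s = [] := List.eq_nil_of_length_eq_zero (by omega)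
    subst this
    simp only [pvDWF, Option.some.injEq] at hs
    omega
  | succ n ih =>
    intro s d hn hs
    match s with
    | [] => simp only [pvDWF, Option.some.injEq] at hs; omega
    | c :: cs =>
      by_cases hc : c = '('
      · subst hc
        rw [pvDWF, if_pos rfl] at hs
        match hk : PySem.List.index? cs ')' with
        | none => rw [hk] at hs; dsimp only at hs; exact absurd hs (by simp)
        | some k =>
          rw [hk] at hs; dsimp only at hs
          match hp : pvParseInts (cs.take k) with
          | none => rw [hp] at hs; dsimp only at hs; exact absurd hs (by simp)
          | some (L, R) =>
            rw [hp] at hs; dsimp only at hs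
            by_cases hcond : 0 ≤ L ∧ 0 ≤ R ∧ L.toNat + (k + 1) ≤ cs.length
            case neg => rw [if_neg hcond] at hs; exact absurd hs (by simp)
            rw [if_pos hcond] at hs
            match h1 : pvDWF ((cs.drop (k + 1)).take L.toNat), h2 : pvDWF ((cs.drop (k + 1)).drop L.toNat) with
            | none, _ => rw [h1] at hs; dsimp only at hs; exact absurd hs (by simp)
            | some d1, none => rw [h1, h2] at hs; dsimp only at hs; exact absurd hs (by simp)
            | some d1, some d2 =>
              rw [h1, h2] at hs; dsimp only at hs
              have hd : d = max (d1 + 1) d2 := by simpa using hs.symm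
              simp only [List.length_cons] at hn
              have hb1 := ih _ d1 (by simp only [List.length_take, List.length_drop]; omega) h1
              have hb2 := ih _ d2 (by simp only [List.length_drop]; omega) h2
              simp only [List.length_take, List.length_drop] at hb1 hb2
              simp only [List.length_cons]
              omega
      · rw [pvDWF, if_neg hc] at hs
        have := ih cs d (by simpa using Nat.le_of_succ_le_succ hn) hs
        simp only [List.length_cons]; omega

theorem pvScanA_spec (s : List Char) : ∀ (k m : Nat) (marker : List Char),
    PySem.List.index? (s.drop m) ')' = some k →
    pvScanA s m marker = some (marker ++ (s.drop m).take k, m + k) := by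
  intro k
  induction k with
  | zero =>
    intro m marker h
    obtain ⟨hk, hget, -⟩ := PySem.List.getElem_of_index?_eq_some h
    have hm : m < s.length := by simp only [List.length_drop] at hk; omega
    have hsm : s[m] = ')' := by
      simpa using hget
    rw [pvScanA, dif_pos hm, if_pos hsm]
    simp
  | succ k ih =>
    intro m marker h
    obtain ⟨hk, hget, hne⟩ := PySem.List.getElem_of_index?_eq_some h
    have hm : m < s.length := by simp only [List.length_drop] at hk; omega
    have hne0 : s[m] ≠ ')' := by
      have := hne 0 (by omega)
      simpa [List.getElem_drop] using this
    -- index? on the tail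
    have hdropm : s.drop m = s[m] :: s.drop (m + 1) := List.drop_eq_getElem_cons hm
    have htail : PySem.List.index? (s.drop (m + 1)) ')' = some k := by
      rw [hdropm, PySem.List.index?_cons_of_ne _ hne0] at h
      cases hkk : PySem.List.index? (s.drop (m + 1)) ')' with
      | none => rw [hkk] at h; simp at h
      | some k' =>
        rw [hkk] at h; simp only [Option.map_some, Option.some.injEq] at h
        exact congrArg some (by omega)
    rw [pvScanA, dif_pos hm, if_neg hne0, ih (m + 1) (marker ++ [s[m]]) htail]
    rw [hdropm, List.take_succ_cons]
    simp only [Option.some.injEq, Prod.mk.injEq, List.append_assoc, List.singleton_append]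
    exact ⟨trivial, by omega⟩

theorem pv_isIn_singleton (c : Char) (s : List Char) :
    PySem.Chars.isIn [c] s = true ↔ c ∈ s := by
  unfold PySem.Chars.isIn
  rw [bne_iff_ne, ne_eq, PySem.Chars.find_eq_neg_one_iff]
  simp [List.singleton_infix_iff]

theorem pv_marker_eq (s : List Char) (i k : Nat) (hk1 : 1 ≤ k) :
    PySem.List.slice s (some ((i : Int) + 1)) (some ((i + k : Nat) : Int)) =
      (s.drop (i + 1)).take (k - 1) := by
  rw [show ((i : Int) + 1) = ((i + 1 : Nat) : Int) by push_cast; ring, PySem.List.slice_natCast]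
  congr 1
  omega

theorem pv_seg_eq (s : List Char) (j : Nat) (L : Int) (hL : 0 ≤ L) :
    PySem.List.slice s (some ((j : Int) + 1)) (some ((j : Int) + 1 + L)) =
      (s.drop (j + 1)).take L.toNat := by
  rw [show ((j : Int) + 1) = ((j + 1 : Nat) : Int) by push_cast; ring,
    PySem.List.slice_toNat s (by positivity) (by omega)]
  congr 1
  omega

theorem pv_chop_eq (s : List Char) (j : Nat) (L : Int) (hL : 0 ≤ L) :
    PySem.List.slice s (some ((j : Int) + 1 + L)) none = s.drop (j + 1 + L.toNat) := by
  rw [PySem.List.slice_from s (by omega : (0:Int) ≤ (j : Int) + 1 + L)]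
  congr 1
  omega

theorem pv_k_pos (s : List Char) (i k : Nat) (h : i < s.length) (hc : s[i] = '(')
    (hk : PySem.List.index? (s.drop i) ')' = some k) :
    1 ≤ k ∧ PySem.List.index? (s.drop (i + 1)) ')' = some (k - 1) := by
  rw [List.drop_eq_getElem_cons h, PySem.List.index?_cons_of_ne _ (by rw [hc]; decide)] at hk
  cases hkk : PySem.List.index? (s.drop (i + 1)) ')' with
  | none => rw [hkk] at hk; simp at hk
  | some k' =>
    rw [hkk] at hk
    simp only [Option.map_some, Option.some.injEq] at hk
    exact ⟨by omega, congrArg some (by omega)⟩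

theorem pvG_drop_paren_none (s : List Char) (i : Nat) (h : i < s.length) (hc : s[i] = '(')
    (hk : PySem.List.index? (s.drop i) ')' = none) :
    pvG (s.drop i) = 0 := by
  rw [List.drop_eq_getElem_cons h, PySem.List.index?_cons_of_ne _ (by rw [hc]; decide)] at hk
  rw [List.drop_eq_getElem_cons h, hc, pvG, if_pos rfl]
  cases hkk : PySem.List.index? (s.drop (i + 1)) ')' with
  | none => rfl
  | some k' => rw [hkk] at hk; simp at hk

theorem pvG_drop_paren (s : List Char) (i k : Nat) (h : i < s.length) (hc : s[i] = '(')
    (hk : PySem.List.index? (s.drop (i + 1)) ')' = some k) :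
    pvG (s.drop i) =
      match pvParseInts ((s.drop (i + 1)).take k) with
      | none => 0
      | some (L, R) =>
        if L < 0 then 0
        else R * pvG ((s.drop (i + 1 + (k + 1))).take L.toNat) +
          pvG ((s.drop (i + 1 + (k + 1))).drop L.toNat) := by
  rw [List.drop_eq_getElem_cons h, hc, pvG, if_pos rfl, hk]
  dsimp only
  rw [List.drop_drop]

theorem pvDWF_paren_elim (s : List Char) (i : Nat) (d : Nat) (h : i < s.length)
    (hc : s[i] = '(') (hd : pvDWF (s.drop i) = some d) :
    ∃ k L R d1 d2,
      PySem.List.index? (s.drop (i + 1)) ')' = some k ∧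
      pvParseInts ((s.drop (i + 1)).take k) = some (L, R) ∧
      0 ≤ L ∧ 0 ≤ R ∧ L.toNat + (k + 1) ≤ (s.drop (i + 1)).length ∧
      pvDWF ((s.drop (i + 1 + (k + 1))).take L.toNat) = some d1 ∧
      pvDWF ((s.drop (i + 1 + (k + 1))).drop L.toNat) = some d2 ∧
      d = max (d1 + 1) d2 := by
  rw [List.drop_eq_getElem_cons h, hc, pvDWF, if_pos rfl] at hd
  match hk : PySem.List.index? (s.drop (i + 1)) ')' with
  | none => rw [hk] at hd; dsimp only at hd; exact absurd hd (by simp)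
  | some k =>
    rw [hk] at hd; dsimp only at hd
    match hp : pvParseInts ((s.drop (i + 1)).take k) with
    | none => rw [hp] at hd; dsimp only at hd; exact absurd hd (by simp)
    | some (L, R) =>
      rw [hp] at hd; dsimp only at hd
      by_cases hcond : 0 ≤ L ∧ 0 ≤ R ∧ L.toNat + (k + 1) ≤ (s.drop (i + 1)).length
      case neg => rw [if_neg hcond] at hd; exact absurd hd (by simp)
      rw [if_pos hcond] at hd
      match h1 : pvDWF (((s.drop (i + 1)).drop (k + 1)).take L.toNat),
            h2 : pvDWF (((s.drop (i + 1)).drop (k + 1)).drop L.toNat) with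
      | none, _ => rw [h1] at hd; dsimp only at hd; exact absurd hd (by simp)
      | some d1, none => rw [h1, h2] at hd; dsimp only at hd; exact absurd hd (by simp)
      | some d1, some d2 =>
        rw [h1, h2] at hd; dsimp only at hd
        rw [show (List.drop (k + 1) (List.drop (i + 1) s)) = List.drop (i + 1 + (k + 1)) s from
          List.drop_drop] at h1 h2
        exact ⟨k, L, R, d1, d2, rfl, hp, hcond.1, hcond.2.1, hcond.2.2, h1, h2,
          by simpa using hd.symm⟩

theorem pvLoopB_eq_pvG (s : List Char) (i : Nat) (total : Int) :
    pvLoopB s i total = total + pvG (s.drop i) := by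
  fun_induction pvLoopB s i total with
  | case1 s i total h hc hk =>
    rw [pvG_drop_paren_none s i h hc hk]; ring
  | case2 s i total h hc k hk hp =>
    obtain ⟨hk1, hk'⟩ := pv_k_pos s i k h hc hk
    rw [pv_marker_eq s i k hk1] at hp
    rw [pvG_drop_paren s i (k - 1) h hc hk', hp]
    ring
  | case3 s i total h hc k hk L R hp hL =>
    obtain ⟨hk1, hk'⟩ := pv_k_pos s i k h hc hk
    rw [pv_marker_eq s i k hk1] at hp
    rw [pvG_drop_paren s i (k - 1) h hc hk', hp]
    dsimp only
    rw [if_pos hL]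
    ring
  | case4 s i total h hc k hk L R hp hL ih1 ih2 =>
    obtain ⟨hk1, hk'⟩ := pv_k_pos s i k h hc hk
    rw [pv_marker_eq s i k hk1] at hp
    rw [pv_seg_eq s (i + k) L (by omega)] at ih1 ih2 ⊢
    rw [pvG_drop_paren s i (k - 1) h hc hk', hp]
    dsimp only
    rw [if_neg hL]
    rw [show i + 1 + (k - 1 + 1) = i + k + 1 by omega]
    rw [ih2, ih1, List.drop_drop, List.drop_zero]
    ring
  | case5 s i total h hc ih =>
    rw [ih, List.drop_eq_getElem_cons h, pvG, if_neg hc]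
    ring
  | case6 s i total h =>
    rw [List.drop_eq_nil_of_le (by omega), pvG]
    ring

theorem pvAuxA_eq_pvG (fuel : Nat) (s : List Char) (i : Nat) (dec : Int) :
    ∀ d : Nat, pvDWF (s.drop i) = some d → d < fuel →
    pvAuxA fuel s i dec = dec + pvG (s.drop i) := by
  fun_induction pvAuxA fuel s i dec with
  | case1 fuel s i dec h hc hx =>
    intro d hd hf
    obtain ⟨k, L, R, d1, d2, hk, hp, hL0, hR0, hbound, h1, h2, hdmax⟩ :=
      pvDWF_paren_elim s i d h hc hd
    rw [pvScanA_spec s k (i + 1) [] hk] at hx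
    cases hx
  | case2 fuel s i dec h hc marker j hsc hp =>
    intro d hd hf
    obtain ⟨k, L, R, d1, d2, hk, hp', hL0, hR0, hbound, h1, h2, hdmax⟩ :=
      pvDWF_paren_elim s i d h hc hd
    rw [pvScanA_spec s k (i + 1) [] hk] at hsc
    simp only [List.nil_append, Option.some.injEq, Prod.mk.injEq] at hsc
    rw [hsc.1, hp] at hp'
    cases hp'
  | case3 fuel s i dec h hc marker j hsc L R hp hL =>
    intro d hd hf
    obtain ⟨k, L', R', d1, d2, hk, hp', hL0, hR0, hbound, h1, h2, hdmax⟩ :=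
      pvDWF_paren_elim s i d h hc hd
    rw [pvScanA_spec s k (i + 1) [] hk] at hsc
    simp only [List.nil_append, Option.some.injEq, Prod.mk.injEq] at hsc
    rw [hsc.1, hp] at hp'
    simp only [Option.some.injEq, Prod.mk.injEq] at hp'
    omega
  | case4 fuel s i dec h hc marker j hsc L R hp hL hnotin ih =>
    intro d hd hf
    obtain ⟨k, L', R', d1, d2, hk, hp', hL0, hR0, hbound, h1, h2, hdmax⟩ :=
      pvDWF_paren_elim s i d h hc hd
    rw [pvScanA_spec s k (i + 1) [] hk] at hsc
    simp only [List.nil_append, Option.some.injEq, Prod.mk.injEq] at hsc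
    rw [hsc.1, hp] at hp'
    simp only [Option.some.injEq, Prod.mk.injEq] at hp'
    obtain ⟨rfl, rfl⟩ := hp'
    obtain ⟨hm, hj⟩ := hsc
    subst hj
    have hj1 : i + 1 + k + 1 = i + 1 + (k + 1) := by omega
    have hseg : PySem.List.slice s (some (((i + 1 + k : Nat) : Int) + 1)) (some (((i + 1 + k : Nat) : Int) + 1 + L))
        = (s.drop (i + 1 + (k + 1))).take L.toNat := by
      rw [pv_seg_eq s (i + 1 + k) L (by omega), hj1]
    have hchop : PySem.List.slice s (some (((i + 1 + k : Nat) : Int) + 1 + L)) none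
        = (s.drop (i + 1 + (k + 1))).drop L.toNat := by
      rw [pv_chop_eq s (i + 1 + k) L (by omega), List.drop_drop]
      congr 1
    have hlen : ((s.drop (i + 1 + (k + 1))).take L.toNat).length = L.toNat := by
      simp only [List.length_take, List.length_drop]
      simp only [List.length_drop] at hbound
      omega
    rw [hseg] at hnotin
    have hIsFalse : PySem.Chars.isIn ['('] ((s.drop (i + 1 + (k + 1))).take L.toNat) = false := by
      simpa using hnotin
    have hnp : '(' ∉ (s.drop (i + 1 + (k + 1))).take L.toNat := by
      intro hmem
      have := (pv_isIn_singleton '(' _).mpr hmem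
      rw [hIsFalse] at this
      cases this
    rw [hseg, hchop] at ih ⊢
    simp only [List.drop_zero] at ih ⊢
    rw [ih d2 h2 (by omega)]
    rw [pvG_drop_paren s i k h hc hk, hm, hp]
    dsimp only
    rw [if_neg hL, hlen, pvG_no_paren _ hnp, hlen]
    ring
  | case5 s i dec h hc marker j hsc L R hp hL hisin =>
    intro d hd hf
    omega
  | case6 s i dec h hc marker j hsc L R hp hL hisin fuel' ihinner ih =>
    intro d hd hf
    obtain ⟨k, L', R', d1, d2, hk, hp', hL0, hR0, hbound, h1, h2, hdmax⟩ :=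
      pvDWF_paren_elim s i d h hc hd
    rw [pvScanA_spec s k (i + 1) [] hk] at hsc
    simp only [List.nil_append, Option.some.injEq, Prod.mk.injEq] at hsc
    rw [hsc.1, hp] at hp'
    simp only [Option.some.injEq, Prod.mk.injEq] at hp'
    obtain ⟨rfl, rfl⟩ := hp'
    obtain ⟨hm, hj⟩ := hsc
    subst hj
    have hj1 : i + 1 + k + 1 = i + 1 + (k + 1) := by omega
    have hseg : PySem.List.slice s (some (((i + 1 + k : Nat) : Int) + 1)) (some (((i + 1 + k : Nat) : Int) + 1 + L))
        = (s.drop (i + 1 + (k + 1))).take L.toNat := by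
      rw [pv_seg_eq s (i + 1 + k) L (by omega), hj1]
    have hchop : PySem.List.slice s (some (((i + 1 + k : Nat) : Int) + 1 + L)) none
        = (s.drop (i + 1 + (k + 1))).drop L.toNat := by
      rw [pv_chop_eq s (i + 1 + k) L (by omega), List.drop_drop]
      congr 1
    obtain ⟨⟨d', hd'le, hDrep⟩, hGrep⟩ :=
      pv_repeat ((s.drop (i + 1 + (k + 1))).take L.toNat) d1 R h1
    rw [hseg] at ihinner ih ⊢
    rw [hchop] at ih ⊢
    rw [ihinner d' (by rw [List.drop_zero]; exact hDrep) (by omega)] at ih ⊢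
    simp only [List.drop_zero] at ih ⊢
    rw [hGrep hR0] at ih ⊢
    rw [ih d2 h2 (by omega)]
    rw [pvG_drop_paren s i k h hc hk, hm, hp]
    dsimp only
    rw [if_neg hL]
    ring
  | case7 fuel s i dec h hc ih =>
    intro d hd hf
    rw [List.drop_eq_getElem_cons h] at hd ⊢
    rw [pvDWF, if_neg hc] at hd
    rw [pvG, if_neg hc, ih d hd hf]
    ring
  | case8 fuel s i dec h =>
    intro d hd hf
    rw [List.drop_eq_nil_of_le (by omega)]
    simp [pvG]

theorem pvDWF_le_length (s : List Char) (d : Nat) (h : pvDWF s = some d) : d ≤ s.length :=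
  pvDWF_le_length_aux s.length s d le_rfl h


theorem pvWFb_eq_isSome (f : Nat) : ∀ s : List Char, s.length < f →
    pvWFb f s = (pvDWF s).isSome := by
  induction f with
  | zero => intro s h; omega
  | succ f ih =>
    intro s h
    match s with
    | [] => simp [pvWFb, pvDWF]
    | c :: cs =>
      by_cases hc : c = '('
      · subst hc
        rw [pvWFb, pvDWF, if_pos rfl, if_pos rfl]
        cases hk : PySem.List.index? cs ')' with
        | none => rfl
        | some k =>
          dsimp only
          cases hp : pvParseInts (cs.take k) with
          | none => rfl
          | some LR =>
            obtain ⟨L, R⟩ := LR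
            dsimp only
            by_cases hcond : 0 ≤ L ∧ 0 ≤ R ∧ L.toNat + (k + 1) ≤ cs.length
            · rw [if_pos hcond]
              simp only [List.length_cons] at h
              rw [ih ((cs.drop (k + 1)).take L.toNat)
                  (by simp only [List.length_take, List.length_drop]; omega),
                ih ((cs.drop (k + 1)).drop L.toNat)
                  (by simp only [List.length_drop]; omega)]
              cases o1 : pvDWF ((cs.drop (k + 1)).take L.toNat) with
              | none => simp
              | some d1 =>
                cases o2 : pvDWF ((cs.drop (k + 1)).drop L.toNat) with
                | none => simp [hcond]
                | some d2 => simp [hcond]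
            · rw [if_neg hcond]
              simp [hcond]
      · rw [pvWFb, pvDWF, if_neg hc, if_neg hc]
        exact ih cs (by simp only [List.length_cons] at h; omega)

-- ===== VERDICT (by name: the statement is the Claim_ definition above) =====
theorem get_decompressed_length_spec : Claim_equal_get_decompressed_length := by
  intro data _ hpre
  unfold Spec_get_decompressed_length
  unfold Pre_get_decompressed_length at hpre
  rw [pvWFb_eq_isSome (data.toList.length + 1) data.toList (by omega)] at hpre
  obtain ⟨d, hd⟩ := Option.isSome_iff_exists.mp hpre
  have hlen := pvDWF_le_length data.toList d hd
  unfold get_decompressed_length get_decompressed_length_alt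
  rw [pvLoopB_eq_pvG,
    pvAuxA_eq_pvG (data.toList.length + 1) data.toList 0 0 d (by simpa using hd) (by omega)]
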